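-- pv_equiv track=rewrite | github.com/dldbdud314/PS | 백준/1202.py | solution
-- ===== SOURCE A (Python) =====
-- from collections import deque
-- from heapq import heappush, heappop
--
-- def solution(gems, bags):
--     gems.sort()
--     gem_queue = deque(gems)
--     bags.sort()
--     total = 0
--     heap = []
--     #이중루프X - 어떻게 개선할지 모르겠다
--     for bag in bags:
--         while gem_queue and gem_queue[0][0] <= bag:
--             _, price = gem_queue.popleft()
--             heappush(heap, (-price, price))
--         if not heap: continue
--         total += heappop(heap)[1]
--
--     return total
-- ===== SOURCE B (Python) =====
-- from bisect import bisect_left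
--
-- def solution(gems, bags):
--     # Same observable in-place sorts as the original.
--     gems.sort()
--     bags.sort()
--     avail = list(bags)   # remaining bag capacities, kept sorted ascending
--     total = 0
--     # Dual greedy: take gems from the highest price down; give each the
--     # smallest remaining bag that can carry it (if any).
--     for w, p in sorted(gems, key=lambda g: -g[1]):
--         i = bisect_left(avail, w)
--         if i < len(avail):
--             total += p
--             avail.pop(i)
--     return total
-- ===== Notes on version B (the rewrite author's own statement) =====
-- stated objective: alternative
-- what changed: Replaces A's bag-ascending sweep (drain a deque of weight-sorted gems into a max-heap, pop the priciest eligible gem per bag) by the dual greedy: iterate gems by price descending and give each gem the smallest remaining feasible bag found by bisect, removing that bag; the totals coincide by the exchange property of this matching problem.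
import Mathlib
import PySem

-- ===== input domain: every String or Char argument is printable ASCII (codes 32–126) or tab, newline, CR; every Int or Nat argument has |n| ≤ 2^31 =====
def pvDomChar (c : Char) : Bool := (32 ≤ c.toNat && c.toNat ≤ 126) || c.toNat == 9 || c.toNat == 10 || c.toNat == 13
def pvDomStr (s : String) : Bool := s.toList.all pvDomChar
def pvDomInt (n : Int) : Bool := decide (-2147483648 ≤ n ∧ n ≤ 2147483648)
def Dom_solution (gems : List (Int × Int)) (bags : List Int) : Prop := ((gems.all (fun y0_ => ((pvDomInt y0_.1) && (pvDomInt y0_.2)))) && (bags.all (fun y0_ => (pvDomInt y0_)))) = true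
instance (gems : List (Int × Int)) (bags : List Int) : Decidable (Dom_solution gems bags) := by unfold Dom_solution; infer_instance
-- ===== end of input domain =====

-- B replaces A's bag-ascending sweep (deque + negated-price max-heap) by the dual greedy:
-- gems are taken by price descending and each gets the smallest remaining feasible bag via bisect;
-- both perform the same in-place sorts of the arguments, and the equivalence proved is about the return value.


-- ===== PORT A =====
-- Python tuple comparison on (Int, Int): lexicographic ≤ (exact: tuples compare componentwise left to right)
def pvLexLe (a b : Int × Int) : Bool := decide (a.1 < b.1) || (a.1 == b.1 && decide (a.2 ≤ b.2))

-- heapq is ported by hand through its contract, which is exact for every observation Source A makes of the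
-- heap: heappush adds the entry to the heap's bag of entries, heappop removes and returns a least entry
-- in Python's tuple order (equal-priority entries here are identical pairs, so the choice is immaterial),
-- and truthiness of the heap is nonemptiness.
def pvHeappush (h : List (Int × Int)) (x : Int × Int) : List (Int × Int) := h ++ [x]

def pvHeappop? : List (Int × Int) → Option ((Int × Int) × List (Int × Int))
  | [] => none
  | x :: xs =>
    match pvHeappop? xs with
    | none => some (x, [])
    | some (m, rest) => if pvLexLe x m then some (x, xs) else some (m, x :: rest)

-- the inner while loop: move gems with weight ≤ bag from the queue front onto the heap as (-price, price)
def pvDrain (bag : Int) : List (Int × Int) → List (Int × Int) → List (Int × Int) × List (Int × Int)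
  | [], h => ([], h)
  | g :: q, h => if g.1 ≤ bag then pvDrain bag q (pvHeappush h (-g.2, g.2)) else (g :: q, h)

-- one iteration of the 'for bag in bags' loop; state = (gem_queue, heap, total)
def pvStepA (st : List (Int × Int) × List (Int × Int) × Int) (bag : Int) :
    List (Int × Int) × List (Int × Int) × Int :=
  let d := pvDrain bag st.1 st.2.1
  match pvHeappop? d.2 with
  | none => (d.1, d.2, st.2.2)
  | some (m, h') => (d.1, h', st.2.2 + m.2)

def solution (gems : List (Int × Int)) (bags : List Int) : Int :=
  ((PySem.List.sorted bags (fun x => x)).foldl pvStepA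
    (PySem.List.sorted2 gems (fun g => g.1) (fun g => g.2), [], 0)).2.2

-- ===== PORT B =====
-- one iteration of the 'for w, p in sorted(gems, key=lambda g: -g[1])' loop; state = (avail, total)
def pvTake (st : List Int × Int) (g : Int × Int) : List Int × Int :=
  let i := PySem.List.bisectLeft st.1 g.1
  if i < st.1.length then (st.1.eraseIdx i, st.2 + g.2) else st

def solution_alt (gems : List (Int × Int)) (bags : List Int) : Int :=
  let gemsS := PySem.List.sorted2 gems (fun g => g.1) (fun g => g.2)
  let bagsS := PySem.List.sorted bags (fun x => x)
  ((PySem.List.sorted gemsS (fun g => -g.2)).foldl pvTake (bagsS, 0)).2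

-- ===== PRECONDITION & SPEC =====
def Spec_solution (gems : List (Int × Int)) (bags : List Int) (out : Int) : Prop := out = solution_alt gems bags
instance (gems : List (Int × Int)) (bags : List Int) (out : Int) : Decidable (Spec_solution gems bags out) := by unfold Spec_solution; infer_instance

-- ===== CLAIM (what is proved, stated in full; the proofs are below) =====
def Claim_equal_solution : Prop := ∀ (gems : List (Int × Int)) (bags : List Int), Dom_solution gems bags → Spec_solution gems bags (solution gems bags)

-- ===== LEMMAS AND PROOFS =====

-- ---------- proof-layer abstract machine: queue + ascending sorted pool of prices ----------

-- bisect.insort-style sorted insertion (proof layer)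
def pvInsort (pool : List Int) (p : Int) : List Int :=
  let k := PySem.List.bisectRight pool p
  pool.take k ++ p :: pool.drop k

def pvPoolAdd (pool : List Int) (T : List (Int × Int)) : List Int :=
  T.foldl (fun P g => pvInsort P g.2) pool

def pvQDrain (bag : Int) : List (Int × Int) → List Int → List (Int × Int) × List Int
  | [], pool => ([], pool)
  | g :: q, pool => if g.1 ≤ bag then pvQDrain bag q (pvInsort pool g.2) else (g :: q, pool)

def pvQStep (st : List (Int × Int) × List Int × Int) (bag : Int) :
    List (Int × Int) × List Int × Int :=
  let d := pvQDrain bag st.1 st.2.1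
  match d.2.getLast? with
  | none => (d.1, d.2, st.2.2)
  | some p => (d.1, d.2.dropLast, st.2.2 + p)

def pvQT (q : List (Int × Int)) (L : List Int) (pool : List Int) (t : Int) : Int :=
  (L.foldl pvQStep (q, pool, t)).2.2

-- the weight-monotone order maintained on the gem queue
def pvWle (a b : Int × Int) : Prop := a.1 ≤ b.1

-- ---------- heap lemmas (A side) ----------

theorem pvLexLe_refl (a : Int × Int) : pvLexLe a a = true := by
  simp [pvLexLe]

theorem pvLexLe_trans {a b c : Int × Int} (h1 : pvLexLe a b = true) (h2 : pvLexLe b c = true) :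
    pvLexLe a c = true := by
  simp only [pvLexLe, Bool.or_eq_true, Bool.and_eq_true, beq_iff_eq, decide_eq_true_eq] at *
  omega

theorem pvLexLe_total {a b : Int × Int} (h : ¬ pvLexLe a b = true) : pvLexLe b a = true := by
  simp only [pvLexLe, Bool.or_eq_true, Bool.and_eq_true, beq_iff_eq, decide_eq_true_eq] at *
  omega

theorem pvHeappop?_nil_iff (h : List (Int × Int)) : pvHeappop? h = none ↔ h = [] := by
  cases h with
  | nil => simp [pvHeappop?]
  | cons x xs =>
    simp only [pvHeappop?]
    cases hx : pvHeappop? xs with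
    | none => simp
    | some p => cases p with | mk m rest => by_cases hc : pvLexLe x m = true <;> simp [hc]

theorem pvHeappop?_spec (h : List (Int × Int)) (hne : h ≠ []) :
    ∃ m rest, pvHeappop? h = some (m, rest) ∧ h.Perm (m :: rest) ∧ ∀ x ∈ h, pvLexLe m x = true := by
  induction h with
  | nil => exact absurd rfl hne
  | cons a xs ih =>
    by_cases hxs : xs = []
    · subst hxs
      refine ⟨a, [], by simp [pvHeappop?], List.Perm.refl _, ?_⟩
      intro y hy
      rw [List.mem_singleton] at hy
      rw [hy]
      exact pvLexLe_refl _
    · obtain ⟨m, rest, hpop, hperm, hmin⟩ := ih hxs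
      by_cases hc : pvLexLe a m = true
      · refine ⟨a, xs, by simp [pvHeappop?, hpop, hc], List.Perm.refl _, ?_⟩
        intro y hy
        rcases List.mem_cons.mp hy with heq | hy
        · rw [heq]; exact pvLexLe_refl _
        · exact pvLexLe_trans hc (hmin y hy)
      · refine ⟨m, a :: rest, by simp [pvHeappop?, hpop, hc], ?_, ?_⟩
        · exact (List.Perm.cons a hperm).trans (List.Perm.swap m a rest)
        · intro y hy
          rcases List.mem_cons.mp hy with rfl | hy
          · exact pvLexLe_total hc
          · exact hmin y hy

-- ---------- insort lemmas ----------

theorem pvInsort_perm (pool : List Int) (p : Int) : (pvInsort pool p).Perm (p :: pool) := by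
  unfold pvInsort
  have h := List.perm_middle (a := p) (l₁ := pool.take (PySem.List.bisectRight pool p))
    (l₂ := pool.drop (PySem.List.bisectRight pool p))
  rwa [List.take_append_drop] at h

theorem pvInsort_sorted (pool : List Int) (p : Int) (hs : pool.Pairwise (· ≤ ·)) :
    (pvInsort pool p).Pairwise (· ≤ ·) := by
  obtain ⟨hk, hleft, hright⟩ := PySem.List.bisectRight_spec pool p hs
  unfold pvInsort
  set k := PySem.List.bisectRight pool p with hkdef
  have hsplit : pool = pool.take k ++ pool.drop k := (List.take_append_drop k pool).symm
  rw [hsplit] at hs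
  rw [List.pairwise_append] at hs
  obtain ⟨h1, h2, h12⟩ := hs
  rw [List.pairwise_append]
  refine ⟨h1, ?_, ?_⟩
  · rw [List.pairwise_cons]
    refine ⟨?_, h2⟩
    intro b hb
    obtain ⟨j, hj, hjb⟩ := List.mem_iff_getElem.mp hb
    have hj' : k + j < pool.length := by
      have hlen := hj; rw [List.length_drop] at hlen; omega
    rw [List.getElem_drop] at hjb
    have hpb := hright (k + j) hj' (by omega)
    omega
  · intro x hx b hb
    rcases List.mem_cons.mp hb with rfl | hb
    · obtain ⟨j, hj, hjx⟩ := List.mem_iff_getElem.mp hx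
      have hjk : j < k := by have hlen := hj; rw [List.length_take] at hlen; omega
      have hj' : j < pool.length := by omega
      rw [List.getElem_take] at hjx
      have hxp := hleft j hj' hjk
      omega
    · exact h12 x hx b hb

theorem pvPoolAdd_perm (T : List (Int × Int)) :
    ∀ pool, (pvPoolAdd pool T).Perm (pool ++ T.map Prod.snd) := by
  induction T with
  | nil => intro pool; simp [pvPoolAdd]
  | cons g gs ih =>
    intro pool
    have h1 : (pvPoolAdd (pvInsort pool g.2) gs).Perm ((pvInsort pool g.2) ++ gs.map Prod.snd) := ih _
    have h2 : ((pvInsort pool g.2) ++ gs.map Prod.snd).Perm (pool ++ (g :: gs).map Prod.snd) := by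
      refine ((pvInsort_perm pool g.2).append_right _).trans ?_
      simp only [List.map_cons, List.cons_append]
      exact List.perm_middle.symm
    exact h1.trans h2

theorem pvPoolAdd_sorted (T : List (Int × Int)) :
    ∀ pool, pool.Pairwise (· ≤ ·) → (pvPoolAdd pool T).Pairwise (· ≤ ·) := by
  induction T with
  | nil => intro pool h; exact h
  | cons g gs ih => intro pool h; exact ih _ (pvInsort_sorted pool g.2 h)

-- ---------- pvQDrain as takeWhile/dropWhile ----------

theorem pvQDrain_eq (bag : Int) :
    ∀ (q : List (Int × Int)) (pool : List Int),
    pvQDrain bag q pool =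
      (q.dropWhile (fun g => decide (g.1 ≤ bag)),
       pvPoolAdd pool (q.takeWhile (fun g => decide (g.1 ≤ bag)))) := by
  intro q
  induction q with
  | nil => intro pool; rfl
  | cons g gs ih =>
    intro pool
    by_cases hc : g.1 ≤ bag
    · simp [pvQDrain, hc, ih, pvPoolAdd]
    · simp [pvQDrain, hc, pvPoolAdd]

-- in a ≤-sorted list every element is ≤ the last one
theorem pv_le_getLast {pool : List Int} (hs : pool.Pairwise (· ≤ ·)) (hne : pool ≠ [])
    (x : Int) (hx : x ∈ pool) : x ≤ pool.getLast hne := by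
  have hsplit : pool = pool.dropLast ++ [pool.getLast hne] := (List.dropLast_append_getLast hne).symm
  rw [hsplit] at hs hx
  rw [List.pairwise_append] at hs
  rcases List.mem_append.mp hx with hx | hx
  · exact hs.2.2 x hx _ (by simp)
  · rw [List.mem_singleton] at hx; omega

-- ---------- A-fold equals the abstract machine ----------

def pvInv (stA : List (Int × Int) × List (Int × Int) × Int)
    (stB : List (Int × Int) × List Int × Int) : Prop :=
  stA.1 = stB.1 ∧ stA.2.2 = stB.2.2 ∧
  (stA.2.1.map Prod.snd).Perm stB.2.1 ∧ stB.2.1.Pairwise (· ≤ ·) ∧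
  ∀ x ∈ stA.2.1, x.1 = -x.2

theorem pvQDrain_drain (bag : Int) :
    ∀ (q : List (Int × Int)) (h : List (Int × Int)) (pool : List Int),
    (h.map Prod.snd).Perm pool → pool.Pairwise (· ≤ ·) → (∀ x ∈ h, x.1 = -x.2) →
    (pvDrain bag q h).1 = (pvQDrain bag q pool).1 ∧
    ((pvDrain bag q h).2.map Prod.snd).Perm (pvQDrain bag q pool).2 ∧
    (pvQDrain bag q pool).2.Pairwise (· ≤ ·) ∧
    (∀ x ∈ (pvDrain bag q h).2, x.1 = -x.2) := by
  intro q
  induction q with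
  | nil => intro h pool hperm hsort hsign; exact ⟨rfl, hperm, hsort, hsign⟩
  | cons g gs ih =>
    intro h pool hperm hsort hsign
    by_cases hc : g.1 ≤ bag
    · simp only [pvDrain, pvQDrain, if_pos hc]
      have hperm' : ((pvHeappush h (-g.2, g.2)).map Prod.snd).Perm (pvInsort pool g.2) := by
        unfold pvHeappush
        rw [List.map_append]
        refine (List.perm_append_singleton _ _).trans ?_
        exact (List.Perm.cons _ hperm).trans (pvInsort_perm pool g.2).symm
      have hsign' : ∀ x ∈ pvHeappush h (-g.2, g.2), x.1 = -x.2 := by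
        intro x hx
        rcases List.mem_append.mp hx with hx | hx
        · exact hsign x hx
        · rw [List.mem_singleton] at hx; subst hx; rfl
      exact ih _ _ hperm' (pvInsort_sorted pool g.2 hsort) hsign'
    · simp only [pvDrain, pvQDrain, if_neg hc]
      exact ⟨by trivial, hperm, hsort, hsign⟩

theorem pvStep_inv (stA : List (Int × Int) × List (Int × Int) × Int)
    (stB : List (Int × Int) × List Int × Int) (bag : Int) (hinv : pvInv stA stB) :
    pvInv (pvStepA stA bag) (pvQStep stB bag) := by
  obtain ⟨hq, ht, hperm, hsort, hsign⟩ := hinv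
  obtain ⟨hq', hperm', hsort', hsign'⟩ :=
    pvQDrain_drain bag stB.1 stA.2.1 stB.2.1 hperm hsort hsign
  rw [← hq] at hq' hperm' hsort' hsign'
  simp only [pvStepA, pvQStep]
  rw [← hq]
  set d := pvDrain bag stA.1 stA.2.1 with hd
  set f := pvQDrain bag stA.1 stB.2.1 with hf
  by_cases hh : d.2 = []
  · have hpool : f.2 = [] := by
      rw [hh] at hperm'
      exact List.nil_perm.mp (by simpa using hperm')
    rw [(pvHeappop?_nil_iff d.2).mpr hh, hpool]
    simp only [List.getLast?_nil]
    refine ⟨hq', ht, ?_, ?_, ?_⟩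
    · simp [hh]
    · simp
    · intro x hx; exact hsign' x hx
  · obtain ⟨m, rest, hpop, hpermh, hmin⟩ := pvHeappop?_spec d.2 hh
    have hpoolne : f.2 ≠ [] := by
      intro hcon
      rw [hcon, List.perm_nil, List.map_eq_nil_iff] at hperm'
      exact hh hperm'
    rw [hpop, List.getLast?_eq_some_getLast hpoolne]
    have hmem : m ∈ d.2 := hpermh.mem_iff.mpr List.mem_cons_self
    have hmax : ∀ y ∈ d.2, y.2 ≤ m.2 := by
      intro y hy
      have h1 := hmin y hy
      have h2 := hsign' m hmem
      have h3 := hsign' y hy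
      simp only [pvLexLe, Bool.or_eq_true, Bool.and_eq_true, beq_iff_eq, decide_eq_true_eq] at h1
      omega
    have hmmem : m.2 ∈ f.2 := hperm'.mem_iff.mp (List.mem_map_of_mem hmem)
    have hLmem : f.2.getLast hpoolne ∈ f.2 := List.getLast_mem hpoolne
    have hLmax : f.2.getLast hpoolne ≤ m.2 := by
      obtain ⟨y, hy, hyeq⟩ := List.mem_map.mp (hperm'.mem_iff.mpr hLmem)
      rw [← hyeq]; exact hmax y hy
    have hmeq : m.2 = f.2.getLast hpoolne :=
      le_antisymm (pv_le_getLast hsort' hpoolne m.2 hmmem) hLmax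
    have hrest : (rest.map Prod.snd).Perm f.2.dropLast := by
      have h1 : (m.2 :: rest.map Prod.snd).Perm f.2 := by
        refine List.Perm.trans ?_ hperm'
        have := (hpermh.map Prod.snd).symm
        simpa using this
      have h2 : f.2.Perm (f.2.getLast hpoolne :: f.2.dropLast) := by
        conv_lhs => rw [← List.dropLast_append_getLast hpoolne]
        exact List.perm_append_singleton _ _
      have h3 := h1.trans h2
      rw [← hmeq] at h3
      exact h3.cons_inv
    refine ⟨hq', ?_, hrest, hsort'.sublist (List.dropLast_sublist _), ?_⟩
    · show stA.2.2 + m.2 = stB.2.2 + f.2.getLast hpoolne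
      rw [ht, hmeq]
    · intro x hx
      exact hsign' x (hpermh.mem_iff.mpr (List.mem_cons_of_mem m hx))

theorem pvFold_inv (bagsS : List Int) :
    ∀ stA stB, pvInv stA stB →
    pvInv (bagsS.foldl pvStepA stA) (bagsS.foldl pvQStep stB) := by
  induction bagsS with
  | nil => intro stA stB h; exact h
  | cons bag rest ih =>
    intro stA stB h
    exact ih _ _ (pvStep_inv stA stB bag h)

theorem solution_eq_pvQT (gems : List (Int × Int)) (bags : List Int) :
    solution gems bags =
      pvQT (PySem.List.sorted2 gems (fun g => g.1) (fun g => g.2))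
        (PySem.List.sorted bags (fun x => x)) [] 0 := by
  have h := pvFold_inv (PySem.List.sorted bags (fun x => x))
    (PySem.List.sorted2 gems (fun g => g.1) (fun g => g.2), [], 0)
    (PySem.List.sorted2 gems (fun g => g.1) (fun g => g.2), [], 0)
    ⟨rfl, rfl, by simp, List.Pairwise.nil, by intro x hx; simp at hx⟩
  exact h.2.1

-- ---------- weight-sortedness of the sorted2 result ----------

def pvLt2 (a b : Int × Int) : Bool :=
  decide (a.1 < b.1) || (!decide (b.1 < a.1) && decide (a.2 < b.2))

theorem pvLt2_le {a b : Int × Int} (h : pvLt2 a b = true) : a.1 ≤ b.1 := by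
  simp only [pvLt2, Bool.or_eq_true, Bool.and_eq_true, Bool.not_eq_eq_eq_not, Bool.not_true,
    decide_eq_true_eq, decide_eq_false_iff_not] at h
  rcases h with h | ⟨h, _⟩ <;> omega

theorem pvLt2_ge {a b : Int × Int} (h : pvLt2 a b = false) : b.1 ≤ a.1 := by
  simp only [pvLt2, Bool.or_eq_false_iff] at h
  have := h.1
  simp only [decide_eq_false_iff_not] at this
  omega

theorem pvInsertBy_wle (x : Int × Int) :
    ∀ ys, ys.Pairwise pvWle → (PySem.List.insertBy pvLt2 x ys).Pairwise pvWle := by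
  intro ys
  induction ys with
  | nil => intro _; simp [PySem.List.insertBy, pvWle]
  | cons y ys ih =>
    intro hp
    rw [List.pairwise_cons] at hp
    obtain ⟨hy, hys⟩ := hp
    by_cases hc : pvLt2 x y = true
    · have hstep : PySem.List.insertBy pvLt2 x (y :: ys) = x :: y :: ys := by
        simp [PySem.List.insertBy, hc]
      rw [hstep]
      refine List.pairwise_cons.mpr ⟨?_, List.pairwise_cons.mpr ⟨hy, hys⟩⟩
      intro z hz
      have hxy : x.1 ≤ y.1 := pvLt2_le hc
      rcases List.mem_cons.mp hz with rfl | hz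
      · exact hxy
      · exact le_trans hxy (hy z hz)
    · have hstep : PySem.List.insertBy pvLt2 x (y :: ys) = y :: PySem.List.insertBy pvLt2 x ys := by
        simp [PySem.List.insertBy, hc]
      rw [hstep]
      refine List.pairwise_cons.mpr ⟨?_, ih hys⟩
      intro z hz
      have hmem : z = x ∨ z ∈ ys := by
        simpa [PySem.List.mem_insertBy] using hz
      rcases hmem with rfl | hmem
      · exact pvLt2_ge (by simpa using hc)
      · exact hy z hmem

theorem pvFoldInsert_wle :
    ∀ (gs : List (Int × Int)) (acc : List (Int × Int)), acc.Pairwise pvWle →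
    (gs.foldl (fun acc x => PySem.List.insertBy pvLt2 x acc) acc).Pairwise pvWle := by
  intro gs
  induction gs with
  | nil => intro acc h; exact h
  | cons g rest ih => intro acc h; exact ih _ (pvInsertBy_wle g _ h)

theorem pvSorted2_wle (gems : List (Int × Int)) :
    (PySem.List.sorted2 gems (fun g => g.1) (fun g => g.2)).Pairwise pvWle := by
  have hred : PySem.List.sorted2 gems (fun g => g.1) (fun g => g.2)
      = gems.foldl (fun acc x => PySem.List.insertBy pvLt2 x acc) [] := rfl
  rw [hred]
  exact pvFoldInsert_wle gems [] List.Pairwise.nil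

-- ---------- bisectLeft on a sorted list: head recursion ----------

theorem pvBisectLeft_cons_ge (b : Int) (bs : List Int) (x : Int)
    (hs : (b :: bs).Pairwise (· ≤ ·)) (hb : x ≤ b) :
    PySem.List.bisectLeft (b :: bs) x = 0 := by
  obtain ⟨hk, hlo, _⟩ := PySem.List.bisectLeft_spec (b :: bs) x hs
  by_contra hne
  have h0 : (b :: bs)[0] < x := hlo 0 (by simp) (by omega)
  simp at h0
  omega

theorem pvBisectLeft_cons_lt (b : Int) (bs : List Int) (x : Int)
    (hs : (b :: bs).Pairwise (· ≤ ·)) (hb : b < x) :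
    PySem.List.bisectLeft (b :: bs) x = PySem.List.bisectLeft bs x + 1 := by
  obtain ⟨hk, hlo, hhi⟩ := PySem.List.bisectLeft_spec (b :: bs) x hs
  obtain ⟨hk', hlo', hhi'⟩ := PySem.List.bisectLeft_spec bs x ((List.pairwise_cons.mp hs).2)
  by_contra hne
  rcases Nat.lt_or_ge (PySem.List.bisectLeft (b :: bs) x) (PySem.List.bisectLeft bs x + 1)
    with hlt | hge
  · rcases Nat.eq_zero_or_pos (PySem.List.bisectLeft (b :: bs) x) with hk0 | hkpos
    · have := hhi 0 (by simp) (by omega)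
      simp at this
      omega
    · obtain ⟨k0, hk0eq⟩ : ∃ k0, PySem.List.bisectLeft (b :: bs) x = k0 + 1 :=
        ⟨PySem.List.bisectLeft (b :: bs) x - 1, by omega⟩
      have hk1 : k0 < PySem.List.bisectLeft bs x := by omega
      have hkb : k0 < bs.length := by omega
      have h1 : bs[k0] < x := hlo' k0 hkb hk1
      have h2 : x ≤ (b :: bs)[k0 + 1]'(by simp; omega) := hhi (k0 + 1) (by simp; omega) (by omega)
      simp at h2
      omega
  · have hkk : PySem.List.bisectLeft bs x + 1 < PySem.List.bisectLeft (b :: bs) x := by omega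
    have hkb : PySem.List.bisectLeft bs x < bs.length := by
      have := hk
      simp at this
      omega
    have h1 : (b :: bs)[PySem.List.bisectLeft bs x + 1]'(by simp; omega) < x :=
      hlo _ (by simp; omega) hkk
    have h2 : x ≤ bs[PySem.List.bisectLeft bs x] := hhi' _ hkb (le_refl _)
    simp at h1
    omega

-- ---------- drain/erase commutation below the gem's weight ----------

theorem pvQDrain_erase (bag : Int) (g : Int × Int) (hgb : ¬ g.1 ≤ bag) :
    ∀ (Q : List (Int × Int)) (pool : List Int), Q.Pairwise pvWle → g ∈ Q →
    pvQDrain bag (Q.erase g) pool = ((pvQDrain bag Q pool).1.erase g, (pvQDrain bag Q pool).2) := by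
  intro Q
  induction Q with
  | nil => intro pool _ hg; simp at hg
  | cons h rest ih =>
    intro pool hp hg
    rw [List.pairwise_cons] at hp
    by_cases hhg : h = g
    · subst hhg
      rw [List.erase_cons_head]
      have hstop : pvQDrain bag (h :: rest) pool = (h :: rest, pool) := by
        simp [pvQDrain, hgb]
      rw [hstop]
      simp only [List.erase_cons_head]
      -- rest's elements all have weight ≥ h.1 > bag, so draining rest does nothing
      cases rest with
      | nil => rfl
      | cons r rs =>
        have hr : h.1 ≤ r.1 := hp.1 r List.mem_cons_self
        have : ¬ r.1 ≤ bag := by omega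
        simp [pvQDrain, this]
    · have hgrest : g ∈ rest := by
        rcases List.mem_cons.mp hg with h1 | h1
        · exact absurd h1.symm hhg
        · exact h1
      rw [List.erase_cons_tail (by simpa using hhg)]
      by_cases hc : h.1 ≤ bag
      · simp only [pvQDrain, if_pos hc]
        exact ih _ hp.2 hgrest
      · simp only [pvQDrain, if_neg hc]
        rw [List.erase_cons_tail (by simpa using hhg)]
  

-- sorted lists that are permutations are equal
theorem pvSortedPermEq {l1 l2 : List Int} (hp : l1.Perm l2)
    (h1 : l1.Pairwise (· ≤ ·)) (h2 : l2.Pairwise (· ≤ ·)) : l1 = l2 :=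
  hp.eq_of_pairwise (fun a b _ _ hab hba => by omega) h1 h2

-- erasing a gem from a block maps to erasing one occurrence of its price
theorem pvMapErasePerm (g : Int × Int) (T : List (Int × Int)) (hg : g ∈ T) :
    ((T.erase g).map Prod.snd).Perm ((T.map Prod.snd).erase g.2) := by
  have h1 : T.Perm (g :: T.erase g) := List.perm_cons_erase hg
  have h2 : (T.map Prod.snd).Perm (g.2 :: (T.erase g).map Prod.snd) := by
    simpa using h1.map Prod.snd
  have hg2 : g.2 ∈ T.map Prod.snd := List.mem_map_of_mem hg
  have h3 : (T.map Prod.snd).Perm (g.2 :: (T.map Prod.snd).erase g.2) :=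
    List.perm_cons_erase hg2
  exact (h2.symm.trans h3).cons_inv

-- the last of a sorted pool containing the maximum value p is p; dropping it erases one p
theorem pvDropLastErase {pool : List Int} (hs : pool.Pairwise (· ≤ ·)) (p : Int)
    (hmem : p ∈ pool) (hmax : ∀ x ∈ pool, x ≤ p) :
    pool.getLast? = some p ∧ pool.dropLast.Perm (pool.erase p) := by
  have hne : pool ≠ [] := by rintro rfl; simp at hmem
  have hlast : pool.getLast hne = p := by
    have h1 := pv_le_getLast hs hne p hmem
    have h2 := hmax _ (List.getLast_mem hne)
    omega
  constructor
  · rw [List.getLast?_eq_some_getLast hne, hlast]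
  · have hsplit : pool = pool.dropLast ++ [pool.getLast hne] := (List.dropLast_append_getLast hne).symm
    have h1 : pool.Perm (p :: pool.dropLast) := by
      conv_lhs => rw [hsplit, hlast]
      exact List.perm_append_singleton _ _
    have h2 : pool.Perm (p :: pool.erase p) := List.perm_cons_erase hmem
    exact (h1.symm.trans h2).cons_inv

-- ---------- takeWhile/dropWhile utilities ----------

theorem pvDW_mono {α : Type} (p p' : α → Bool) (himp : ∀ x, p x = true → p' x = true) :
    ∀ l : List α, (l.dropWhile p).dropWhile p' = l.dropWhile p' := by
  intro l
  induction l with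
  | nil => rfl
  | cons h rest ih =>
    by_cases hc : p h = true
    · rw [List.dropWhile_cons_of_pos hc, ih, List.dropWhile_cons_of_pos (himp h hc)]
    · rw [List.dropWhile_cons_of_neg hc]

theorem pvTW_split {α : Type} (p p' : α → Bool) (himp : ∀ x, p x = true → p' x = true) :
    ∀ l : List α, l.takeWhile p' = l.takeWhile p ++ (l.dropWhile p).takeWhile p' := by
  intro l
  induction l with
  | nil => rfl
  | cons h rest ih =>
    by_cases hc : p h = true
    · rw [List.takeWhile_cons_of_pos (himp h hc), List.takeWhile_cons_of_pos hc,
        List.dropWhile_cons_of_pos hc, ih, List.cons_append]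
    · rw [List.takeWhile_cons_of_neg hc, List.dropWhile_cons_of_neg hc, List.nil_append]

theorem pvTW_DW {α : Type} (p : α → Bool) :
    ∀ l : List α, (l.dropWhile p).takeWhile p = [] := by
  intro l
  induction l with
  | nil => rfl
  | cons h rest ih =>
    by_cases hc : p h = true
    · rw [List.dropWhile_cons_of_pos hc]; exact ih
    · rw [List.dropWhile_cons_of_neg hc, List.takeWhile_cons_of_neg hc]

theorem pvDW_append_sat {α : Type} (p : α → Bool) (xs ys : List α) (hall : ∀ x ∈ xs, p x = true) :
    (xs ++ ys).dropWhile p = ys.dropWhile p := by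
  induction xs with
  | nil => rfl
  | cons h rest ih =>
    rw [List.cons_append, List.dropWhile_cons_of_pos (hall h List.mem_cons_self)]
    exact ih (fun x hx => hall x (List.mem_cons_of_mem h hx))

theorem pvTW_append_sat {α : Type} (p : α → Bool) (xs ys : List α) (hall : ∀ x ∈ xs, p x = true) :
    (xs ++ ys).takeWhile p = xs ++ ys.takeWhile p := by
  induction xs with
  | nil => rfl
  | cons h rest ih =>
    rw [List.cons_append, List.takeWhile_cons_of_pos (hall h List.mem_cons_self),
      ih (fun x hx => hall x (List.mem_cons_of_mem h hx)), List.cons_append]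

theorem pvMemTakeWhile (b : Int) :
    ∀ Q : List (Int × Int), Q.Pairwise pvWle → ∀ g ∈ Q, g.1 ≤ b →
    g ∈ Q.takeWhile (fun x => decide (x.1 ≤ b)) := by
  intro Q
  induction Q with
  | nil => intro _ g hg _; simp at hg
  | cons h rest ih =>
    intro hp g hg hgb
    rw [List.pairwise_cons] at hp
    by_cases hc : h.1 ≤ b
    · rw [List.takeWhile_cons_of_pos (by simpa using hc)]
      rcases List.mem_cons.mp hg with rfl | hg'
      · exact List.mem_cons_self
      · exact List.mem_cons_of_mem h (ih hp.2 g hg' hgb)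
    · rcases List.mem_cons.mp hg with rfl | hg'
      · exact absurd hgb hc
      · exact absurd (le_trans (hp.1 g hg') hgb) hc

theorem pvMemDropWhile (b : Int) (Q : List (Int × Int)) (g : Int × Int)
    (hg : g ∈ Q) (hgb : ¬ g.1 ≤ b) :
    g ∈ Q.dropWhile (fun x => decide (x.1 ≤ b)) := by
  have hsplit := List.takeWhile_append_dropWhile (p := fun x : Int × Int => decide (x.1 ≤ b)) (l := Q)
  rw [← hsplit] at hg
  rcases List.mem_append.mp hg with hg' | hg'
  · exact absurd (by simpa using List.mem_takeWhile_imp hg') hgb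
  · exact hg'

theorem pvErasePermAppend {α : Type} [DecidableEq α] (P X : List α) (a : α) (ha : a ∈ X) :
    ((P ++ X).erase a).Perm (P ++ X.erase a) := by
  have h1 : (P ++ X).Perm (a :: (P ++ X).erase a) := List.perm_cons_erase (by simp [ha])
  have h2 : (P ++ X).Perm (a :: (P ++ X.erase a)) :=
    ((List.perm_cons_erase ha).append_left P).trans List.perm_middle
  exact (h1.symm.trans h2).cons_inv

-- ---------- facts about one drain ----------

theorem pvDrainFacts (b : Int) (Q : List (Int × Int)) (pool : List Int) (g : Int × Int)
    (hQ : Q.Pairwise pvWle) (hps : pool.Pairwise (· ≤ ·))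
    (hpx : ∀ x ∈ pool, x ≤ g.2) (hqx : ∀ x ∈ Q, x.2 ≤ g.2) :
    (pvQDrain b Q pool).2.Pairwise (· ≤ ·) ∧ (∀ x ∈ (pvQDrain b Q pool).2, x ≤ g.2) ∧
    (pvQDrain b Q pool).1.Pairwise pvWle ∧ (∀ x ∈ (pvQDrain b Q pool).1, x.2 ≤ g.2) := by
  rw [pvQDrain_eq]
  refine ⟨pvPoolAdd_sorted _ _ hps, ?_, hQ.sublist (List.dropWhile_sublist _), ?_⟩
  · intro x hx
    have hperm := pvPoolAdd_perm (Q.takeWhile (fun x => decide (x.1 ≤ b))) pool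
    rcases List.mem_append.mp (hperm.mem_iff.mp hx) with hx' | hx'
    · exact hpx x hx'
    · obtain ⟨y, hy, rfl⟩ := List.mem_map.mp hx'
      exact hqx y ((List.takeWhile_sublist _).subset hy)
  · intro x hx
    exact hqx x ((List.dropWhile_sublist _).subset hx)

-- when the current bag can carry the maximum-price gem g, the drained pool pops g's price
theorem pvDrainTop (b : Int) (Q : List (Int × Int)) (pool : List Int) (g : Int × Int)
    (hQ : Q.Pairwise pvWle) (hps : pool.Pairwise (· ≤ ·)) (hg : g ∈ Q) (hgb : g.1 ≤ b)
    (hpx : ∀ x ∈ pool, x ≤ g.2) (hqx : ∀ x ∈ Q, x.2 ≤ g.2) :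
    (pvQDrain b Q pool).2.getLast? = some g.2 ∧
    ((pvQDrain b Q pool).2.dropLast).Perm (((pvQDrain b Q pool).2).erase g.2) := by
  obtain ⟨hs, hx, -, -⟩ := pvDrainFacts b Q pool g hQ hps hpx hqx
  have hmem : g.2 ∈ (pvQDrain b Q pool).2 := by
    rw [pvQDrain_eq]
    exact (pvPoolAdd_perm _ pool).mem_iff.mpr
      (List.mem_append_right _ (List.mem_map_of_mem (pvMemTakeWhile b Q hQ g hg hgb)))
  exact pvDropLastErase hs g.2 hmem hx

-- ---------- the peel lemma ----------

-- after the gem g (max price, feasible for bag b) is taken at bag b, a later bag b' sees the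
-- same state as the run that started without g and with the first feasible bag removed
theorem pvQStep_congr (g : Int × Int) (Q : List (Int × Int)) (pool : List Int)
    (b b' : Int) (t : Int)
    (hQ : Q.Pairwise pvWle) (hg : g ∈ Q) (hsort : pool.Pairwise (· ≤ ·))
    (hgb : g.1 ≤ b) (hbb' : b ≤ b')
    (hpx : ∀ x ∈ pool, x ≤ g.2) (hqx : ∀ x ∈ Q, x.2 ≤ g.2) :
    pvQStep ((pvQDrain b Q pool).1, ((pvQDrain b Q pool).2).dropLast, t) b' =
    pvQStep (Q.erase g, pool, t) b' := by
  have himp : ∀ x : Int × Int, decide (x.1 ≤ b) = true → decide (x.1 ≤ b') = true := by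
    intro x hx; simp at hx ⊢; omega
  have hTb : g ∈ Q.takeWhile (fun x => decide (x.1 ≤ b)) := pvMemTakeWhile b Q hQ g hg hgb
  have hTb' : g ∈ Q.takeWhile (fun x => decide (x.1 ≤ b')) :=
    pvMemTakeWhile b' Q hQ g hg (le_trans hgb hbb')
  -- decomposition of Q.erase g at threshold b'
  have hEdecomp : Q.erase g =
      (Q.takeWhile (fun x => decide (x.1 ≤ b'))).erase g ++ Q.dropWhile (fun x => decide (x.1 ≤ b')) := by
    conv_lhs => rw [← List.takeWhile_append_dropWhile
      (p := fun x : Int × Int => decide (x.1 ≤ b')) (l := Q)]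
    exact List.erase_append_left _ hTb'
  have hallE : ∀ x ∈ (Q.takeWhile (fun x => decide (x.1 ≤ b'))).erase g, decide (x.1 ≤ b') = true := by
    intro x hx
    exact List.mem_takeWhile_imp (p := fun y : Int × Int => decide (y.1 ≤ b')) (List.erase_sublist.subset hx)
  -- queues agree
  have hqueue : (pvQDrain b Q pool).1.dropWhile (fun x => decide (x.1 ≤ b')) =
      (Q.erase g).dropWhile (fun x => decide (x.1 ≤ b')) := by
    rw [pvQDrain_eq, hEdecomp, pvDW_append_sat _ _ _ hallE]
    exact (pvDW_mono _ _ himp Q).trans (pvDW_mono _ _ (fun x hx => hx) Q).symm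
  -- pools agree
  have hTE : (Q.erase g).takeWhile (fun x => decide (x.1 ≤ b')) =
      (Q.takeWhile (fun x => decide (x.1 ≤ b'))).erase g := by
    rw [hEdecomp, pvTW_append_sat _ _ _ hallE, pvTW_DW, List.append_nil]
  have hPBs : (pvQDrain b Q pool).2.Pairwise (· ≤ ·) ∧ ∀ x ∈ (pvQDrain b Q pool).2, x ≤ g.2 := by
    obtain ⟨h1, h2, -, -⟩ := pvDrainFacts b Q pool g hQ hsort hpx hqx
    exact ⟨h1, h2⟩
  obtain ⟨-, hdlperm⟩ := pvDrainTop b Q pool g hQ hsort hg hgb hpx hqx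
  have hpool : pvPoolAdd ((pvQDrain b Q pool).2.dropLast)
        ((pvQDrain b Q pool).1.takeWhile (fun x => decide (x.1 ≤ b'))) =
      pvPoolAdd pool ((Q.erase g).takeWhile (fun x => decide (x.1 ≤ b'))) := by
    apply pvSortedPermEq
    · -- permutation between the two pools
      have hTb2 : (pvQDrain b Q pool).1.takeWhile (fun x => decide (x.1 ≤ b')) =
          (Q.dropWhile (fun x => decide (x.1 ≤ b))).takeWhile (fun x => decide (x.1 ≤ b')) := by
        rw [pvQDrain_eq]
      have hsplitT : Q.takeWhile (fun x => decide (x.1 ≤ b')) =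
          Q.takeWhile (fun x => decide (x.1 ≤ b)) ++
          (Q.dropWhile (fun x => decide (x.1 ≤ b))).takeWhile (fun x => decide (x.1 ≤ b')) :=
        pvTW_split _ _ himp Q
      refine (pvPoolAdd_perm _ _).trans (((pvPoolAdd_perm _ _).trans ?_).symm)
      -- RHS side: pool ++ prices of (takeWhile b').erase g
      rw [hTE, hTb2]
      have hmape : (((Q.takeWhile (fun x => decide (x.1 ≤ b'))).erase g).map Prod.snd).Perm
          (((Q.takeWhile (fun x => decide (x.1 ≤ b'))).map Prod.snd).erase g.2) :=
        pvMapErasePerm g _ hTb'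
      refine (hmape.append_left pool).trans ?_
      rw [hsplitT, List.map_append,
        List.erase_append_left _ (List.mem_map_of_mem (f := Prod.snd) hTb)]
      have hPBperm : (pvQDrain b Q pool).2.Perm
          (pool ++ (Q.takeWhile (fun x => decide (x.1 ≤ b))).map Prod.snd) := by
        rw [pvQDrain_eq]; exact pvPoolAdd_perm _ _
      have h1 : ((pvQDrain b Q pool).2.dropLast).Perm
          (pool ++ ((Q.takeWhile (fun x => decide (x.1 ≤ b))).map Prod.snd).erase g.2) := by
        refine hdlperm.trans ((hPBperm.erase g.2).trans ?_)
        exact pvErasePermAppend pool _ g.2 (List.mem_map_of_mem hTb)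
      rw [← List.append_assoc]
      exact (h1.symm.append_right _)
    · exact pvPoolAdd_sorted _ _ (hPBs.1.sublist (List.dropLast_sublist _))
    · exact pvPoolAdd_sorted _ _ hsort
  have hq12 : pvQDrain b' (pvQDrain b Q pool).1 ((pvQDrain b Q pool).2.dropLast)
      = pvQDrain b' (Q.erase g) pool := by
    rw [pvQDrain_eq b', pvQDrain_eq b', hqueue, hpool]
  simp only [pvQStep, hq12]

theorem pvPeel (L : List Int) :
    ∀ (Q : List (Int × Int)) (pool : List Int) (t : Int) (g : Int × Int),
    L.Pairwise (· ≤ ·) → Q.Pairwise pvWle → g ∈ Q → (∀ x ∈ Q, x.2 ≤ g.2) →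
    pool.Pairwise (· ≤ ·) → (∀ x ∈ pool, x ≤ g.2) →
    pvQT Q L pool t =
      (if PySem.List.bisectLeft L g.1 < L.length
       then pvQT (Q.erase g) (L.eraseIdx (PySem.List.bisectLeft L g.1)) pool (t + g.2)
       else pvQT (Q.erase g) L pool t) := by
  induction L with
  | nil =>
    intro Q pool t g _ _ _ _ _ _
    simp only [List.length_nil, if_neg (by omega : ¬ PySem.List.bisectLeft [] g.1 < 0)]
    rfl
  | cons b bs ih =>
    intro Q pool t g hL hQ hg hqx hps hpx
    by_cases hgb : g.1 ≤ b
    · -- g fits the head bag: the head bag takes g, and the rest of the runs coincide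
      have hbl : PySem.List.bisectLeft (b :: bs) g.1 = 0 := pvBisectLeft_cons_ge b bs g.1 hL hgb
      rw [hbl, if_pos (by simp)]
      obtain ⟨hlast, -⟩ := pvDrainTop b Q pool g hQ hps hg hgb hpx hqx
      have hstep : pvQStep (Q, pool, t) b =
          ((pvQDrain b Q pool).1, ((pvQDrain b Q pool).2).dropLast, t + g.2) := by
        simp only [pvQStep, hlast]
      show (bs.foldl pvQStep (pvQStep (Q, pool, t) b)).2.2 = _
      rw [hstep]
      have herz : (b :: bs).eraseIdx 0 = bs := rfl
      rw [herz]
      cases bs with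
      | nil => rfl
      | cons b' bs' =>
        have hbb' : b ≤ b' := (List.pairwise_cons.mp hL).1 b' List.mem_cons_self
        have hcong := pvQStep_congr g Q pool b b' (t + g.2) hQ hg hps hgb hbb' hpx hqx
        show (bs'.foldl pvQStep
          (pvQStep ((pvQDrain b Q pool).1, ((pvQDrain b Q pool).2).dropLast, t + g.2) b')).2.2 = _
        rw [hcong]
        rfl
    · -- the head bag is too small for g: both runs do the same thing at bag b
      have hbl : PySem.List.bisectLeft (b :: bs) g.1 =
          PySem.List.bisectLeft bs g.1 + 1 := pvBisectLeft_cons_lt b bs g.1 hL (by omega)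
      have herase := pvQDrain_erase b g hgb Q pool hQ hg
      obtain ⟨hs2, hx2, hw1, hx1⟩ := pvDrainFacts b Q pool g hQ hps hpx hqx
      have hgS : g ∈ (pvQDrain b Q pool).1 := by
        rw [pvQDrain_eq]; exact pvMemDropWhile b Q g hg hgb
      have hLbs : bs.Pairwise (· ≤ ·) := (List.pairwise_cons.mp hL).2
      -- one step on each side
      have hstep2 : ∀ u : Int, pvQStep (Q.erase g, pool, u) b =
          ((pvQDrain b Q pool).1.erase g,
            (match (pvQDrain b Q pool).2.getLast? with
              | none => (pvQDrain b Q pool).2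
              | some _ => (pvQDrain b Q pool).2.dropLast),
            (match (pvQDrain b Q pool).2.getLast? with
              | none => u
              | some p => u + p)) := by
        intro u
        simp only [pvQStep, herase]
        cases hl : (pvQDrain b Q pool).2.getLast? <;> simp
      cases hl : (pvQDrain b Q pool).2.getLast? with
      | none =>
        have hmain := ih (pvQDrain b Q pool).1 (pvQDrain b Q pool).2 t g hLbs hw1 hgS hx1 hs2 hx2
        have hlhs : pvQT Q (b :: bs) pool t = pvQT (pvQDrain b Q pool).1 bs (pvQDrain b Q pool).2 t := by
          show (bs.foldl pvQStep (pvQStep (Q, pool, t) b)).2.2 = _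
          simp only [pvQStep, hl]
          rfl
        rw [hlhs, hmain, hbl]
        by_cases hc : PySem.List.bisectLeft bs g.1 < bs.length
        · rw [if_pos hc, if_pos (by simp only [List.length_cons]; omega)]
          rw [List.eraseIdx_cons_succ]
          have hrhs : pvQT (Q.erase g) (b :: bs.eraseIdx (PySem.List.bisectLeft bs g.1)) pool (t + g.2) =
              pvQT ((pvQDrain b Q pool).1.erase g) (bs.eraseIdx (PySem.List.bisectLeft bs g.1))
                (pvQDrain b Q pool).2 (t + g.2) := by
            show ((bs.eraseIdx (PySem.List.bisectLeft bs g.1)).foldl pvQStep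
              (pvQStep (Q.erase g, pool, t + g.2) b)).2.2 = _
            rw [hstep2 (t + g.2), hl]
            rfl
          rw [hrhs]
        · rw [if_neg hc, if_neg (by simp only [List.length_cons]; omega)]
          have hrhs : pvQT (Q.erase g) (b :: bs) pool t =
              pvQT ((pvQDrain b Q pool).1.erase g) bs (pvQDrain b Q pool).2 t := by
            show (bs.foldl pvQStep (pvQStep (Q.erase g, pool, t) b)).2.2 = _
            rw [hstep2 t, hl]
            rfl
          rw [hrhs]
      | some pp =>
        have hmain := ih (pvQDrain b Q pool).1 ((pvQDrain b Q pool).2.dropLast) (t + pp) g hLbs hw1 hgS hx1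
          (hs2.sublist (List.dropLast_sublist _))
          (fun x hx => hx2 x ((List.dropLast_sublist _).subset hx))
        have hlhs : pvQT Q (b :: bs) pool t =
            pvQT (pvQDrain b Q pool).1 bs ((pvQDrain b Q pool).2.dropLast) (t + pp) := by
          show (bs.foldl pvQStep (pvQStep (Q, pool, t) b)).2.2 = _
          simp only [pvQStep, hl]
          rfl
        rw [hlhs, hmain, hbl]
        by_cases hc : PySem.List.bisectLeft bs g.1 < bs.length
        · rw [if_pos hc, if_pos (by simp only [List.length_cons]; omega)]
          rw [List.eraseIdx_cons_succ]
          have hrhs : pvQT (Q.erase g) (b :: bs.eraseIdx (PySem.List.bisectLeft bs g.1)) pool (t + g.2) =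
              pvQT ((pvQDrain b Q pool).1.erase g) (bs.eraseIdx (PySem.List.bisectLeft bs g.1))
                ((pvQDrain b Q pool).2.dropLast) (t + g.2 + pp) := by
            show ((bs.eraseIdx (PySem.List.bisectLeft bs g.1)).foldl pvQStep
              (pvQStep (Q.erase g, pool, t + g.2) b)).2.2 = _
            rw [hstep2 (t + g.2), hl]
            rfl
          rw [hrhs]
          have hcomm : t + pp + g.2 = t + g.2 + pp := by ring
          rw [hcomm]
        · rw [if_neg hc, if_neg (by simp only [List.length_cons]; omega)]
          have hrhs : pvQT (Q.erase g) (b :: bs) pool t =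
              pvQT ((pvQDrain b Q pool).1.erase g) bs ((pvQDrain b Q pool).2.dropLast) (t + pp) := by
            show (bs.foldl pvQStep (pvQStep (Q.erase g, pool, t) b)).2.2 = _
            rw [hstep2 t, hl]
            rfl
          rw [hrhs]

-- ---------- the bridge: abstract machine equals the dual greedy ----------

theorem pvQT_nil_queue (L : List Int) : ∀ t, pvQT [] L [] t = t := by
  induction L with
  | nil => intro t; rfl
  | cons b bs ih =>
    intro t
    show pvQT [] bs [] t = t
    exact ih t

theorem pvBridge (D : List (Int × Int)) :
    ∀ (Q : List (Int × Int)) (L : List Int) (t : Int),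
    D.Perm Q → D.Pairwise (fun a b => b.2 ≤ a.2) → Q.Pairwise pvWle → L.Pairwise (· ≤ ·) →
    (D.foldl pvTake (L, t)).2 = pvQT Q L [] t := by
  induction D with
  | nil =>
    intro Q L t hperm _ _ _
    have hQ : Q = [] := hperm.symm.eq_nil
    subst hQ
    exact (pvQT_nil_queue L t).symm
  | cons g D' ih =>
    intro Q L t hperm hdesc hQ hL
    have hgQ : g ∈ Q := hperm.mem_iff.mp List.mem_cons_self
    have hmax : ∀ x ∈ Q, x.2 ≤ g.2 := by
      intro x hx
      rcases List.mem_cons.mp (hperm.mem_iff.mpr hx) with rfl | hx'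
      · exact le_refl _
      · exact (List.pairwise_cons.mp hdesc).1 x hx'
    have hD' : D'.Perm (Q.erase g) := by
      have h1 : (g :: D').Perm (g :: Q.erase g) := hperm.trans (List.perm_cons_erase hgQ)
      exact h1.cons_inv
    have hdesc' : D'.Pairwise (fun a b => b.2 ≤ a.2) := (List.pairwise_cons.mp hdesc).2
    have hQ' : (Q.erase g).Pairwise pvWle := hQ.sublist List.erase_sublist
    have hpeel := pvPeel L Q [] t g hL hQ hgQ hmax List.Pairwise.nil (by intro x hx; simp at hx)
    show ((D'.foldl pvTake (pvTake (L, t) g))).2 = pvQT Q L [] t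
    unfold pvTake
    by_cases hi : PySem.List.bisectLeft L g.1 < L.length
    · rw [hpeel, if_pos hi]
      simp only [if_pos hi]
      exact ih (Q.erase g) _ _ hD' hdesc' hQ' (hL.sublist (List.eraseIdx_sublist L _))
    · rw [hpeel, if_neg hi]
      simp only [if_neg hi]
      exact ih (Q.erase g) L t hD' hdesc' hQ' hL

-- ===== VERDICT (by name: the statement is the Claim_ definition above) =====
theorem solution_spec : Claim_equal_solution := by
  intro gems bags _
  unfold Spec_solution solution_alt
  rw [solution_eq_pvQT]
  set gemsS := PySem.List.sorted2 gems (fun g => g.1) (fun g => g.2) with hg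
  set bagsS := PySem.List.sorted bags (fun x => x) with hb
  have hdesc : (PySem.List.sorted gemsS (fun g => -g.2)).Pairwise (fun a b => b.2 ≤ a.2) := by
    have := PySem.List.sorted_pairwise gemsS (fun g => -g.2)
    exact this.imp (by intro a b h; omega)
  have hperm : (PySem.List.sorted gemsS (fun g => -g.2)).Perm gemsS :=
    PySem.List.sorted_perm gemsS (fun g => -g.2) false
  have hLs : bagsS.Pairwise (· ≤ ·) := PySem.List.sorted_pairwise bags (fun x => x)
  exact (pvBridge _ gemsS bagsS 0 hperm hdesc (pvSorted2_wle gems) hLs).symm
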